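-- pv_equiv track=rewrite | github.com/Spiderasasen/Portfolio | projects/Python/code/main.py | checking_1_majority
-- ===== SOURCE A (Python) =====
-- def checking_1_majority(list):
--     #count the amount lavaliere
--     num_1 = list.count(1)
--
--     #if the list is not 154 1's then go through a loop
--     if num_1 != 154:
--         #for the whole list, if the number is 0, then turn it to 1
--         for i in range(len(list)):
--             if list[i] == 0:
--                 list[i] = 1
--
--             #will check if the new count is now 154, if so break out the loop
--             num_1 = list.count(1)
--             if num_1 == 154:
--                 break
--
--     return list
-- ===== SOURCE B (Python) =====
-- def checking_1_majority(list):
--     # single pass with a precomputed budget: no recount of 1s inside the loop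
--     remaining = 154 - list.count(1)
--     if remaining != 0:
--         out = []
--         for x in list:
--             if remaining != 0 and x == 0:
--                 out.append(1)
--                 remaining -= 1
--             else:
--                 out.append(x)
--         list[:] = out
--     return list
-- ===== Notes on version B (the rewrite author's own statement) =====
-- stated objective: faster
-- what changed: B computes the 1-count once and makes a single pass carrying a flip budget, so A's full list.count(1) rescan inside every loop iteration disappears.
import Mathlib
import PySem

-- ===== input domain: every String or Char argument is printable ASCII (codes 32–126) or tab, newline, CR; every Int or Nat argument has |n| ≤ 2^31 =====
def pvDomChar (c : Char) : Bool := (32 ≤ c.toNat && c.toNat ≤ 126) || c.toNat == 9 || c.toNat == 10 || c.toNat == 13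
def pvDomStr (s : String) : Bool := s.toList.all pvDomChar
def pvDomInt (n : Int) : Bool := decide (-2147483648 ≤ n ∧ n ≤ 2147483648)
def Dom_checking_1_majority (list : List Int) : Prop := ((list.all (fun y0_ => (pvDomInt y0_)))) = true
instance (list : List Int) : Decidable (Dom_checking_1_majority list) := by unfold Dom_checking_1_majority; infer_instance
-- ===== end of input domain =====

-- B replaces A's recount-every-iteration loop by one pass with a precomputed flip budget (equivalence is about the return value; both Pythons mutate the argument in place to the same final content).

-- ===== PORT A =====
-- the for/range loop of A: i runs over 0..len-1 on the current list; each iteration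
-- optionally sets index i to 1, recounts the 1s, and breaks when the count is 154.
-- list[i] read/write with 0 ≤ i < len is exact as List.getD / List.set.
def checking_1_majority_go (l : List Int) (i : Nat) : List Int :=
  if i < l.length then
    let l' := if l.getD i 0 = 0 then l.set i 1 else l
    if (PySem.List.count l' 1 : Int) = 154 then l'
    else checking_1_majority_go l' (i + 1)
  else l
termination_by l.length - i
decreasing_by
  rename_i h _
  split <;> simp_all <;> omega

def checking_1_majority (list : List Int) : List Int :=
  let num_1 : Int := (PySem.List.count list 1 : Int)
  if num_1 ≠ 154 then checking_1_majority_go list 0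
  else list

-- ===== PORT B =====
def checking_1_majority_alt (list : List Int) : List Int :=
  let remaining : Int := 154 - (PySem.List.count list 1 : Int)
  if remaining ≠ 0 then
    (list.foldl
      (fun (st : List Int × Int) x =>
        if st.2 ≠ 0 ∧ x = 0 then (st.1 ++ [1], st.2 - 1) else (st.1 ++ [x], st.2))
      ([], remaining)).1
  else list

-- ===== PRECONDITION & SPEC =====
def Spec_checking_1_majority (list : List Int) (out : List Int) : Prop := out = checking_1_majority_alt list
instance (list : List Int) (out : List Int) : Decidable (Spec_checking_1_majority list out) := by unfold Spec_checking_1_majority; infer_instance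

-- ===== CLAIM (what is proved, stated in full; the proofs are below) =====
def Claim_equal_checking_1_majority : Prop := ∀ (list : List Int), Dom_checking_1_majority list → Spec_checking_1_majority list (checking_1_majority list)

-- ===== LEMMAS AND PROOFS =====

-- Reference function: flip the leading zeros left to right, decrementing the budget n,
-- stopping as soon as the budget hits 0 (a budget that starts negative never hits 0).
def flipF : List Int → Int → List Int
  | [], _ => []
  | x :: xs, n =>
    if n = 0 then x :: xs
    else if x = 0 then 1 :: flipF xs (n - 1)
    else x :: flipF xs n

theorem flipF_zero (l : List Int) : flipF l 0 = l := by
  cases l <;> simp [flipF]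

theorem go_eq_flipF (rest done : List Int) (n : Int)
    (hn : 154 - (PySem.List.count (done ++ rest) 1 : Int) = n) (h0 : n ≠ 0) :
    checking_1_majority_go (done ++ rest) done.length = done ++ flipF rest n := by
  induction rest generalizing done n with
  | nil =>
      rw [checking_1_majority_go.eq_def]
      simp [flipF]
  | cons x xs ih =>
      rw [checking_1_majority_go.eq_def]
      have hlt : done.length < (done ++ x :: xs).length := by simp
      rw [if_pos hlt]
      have hget : (done ++ x :: xs).getD done.length 0 = x := by
        simp [List.getD]
      have hset : (done ++ x :: xs).set done.length 1 = done ++ 1 :: xs := by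
        rw [List.set_append_right _ _ (le_refl _)]
        simp
      by_cases hx : x = 0
      · subst hx
        rw [hget, if_pos rfl, hset]
        have hc : (PySem.List.count (done ++ (1 : Int) :: xs) 1 : Int)
            = (PySem.List.count (done ++ (0 : Int) :: xs) 1 : Int) + 1 := by
          simp [PySem.List.count_eq, List.count_append]; ring
        by_cases hstop : (PySem.List.count (done ++ (1 : Int) :: xs) 1 : Int) = 154
        · rw [if_pos hstop]
          have hn1 : n - 1 = 0 := by omega
          have : flipF ((0 : Int) :: xs) n = 1 :: xs := by
            simp [flipF, h0, hn1, flipF_zero]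
          rw [this]
        · rw [if_neg hstop]
          have hcnt : 154 - (PySem.List.count ((done ++ [1]) ++ xs) 1 : Int) = n - 1 := by
            have : (PySem.List.count ((done ++ [1]) ++ xs) 1 : Int)
                = (PySem.List.count (done ++ (0 : Int) :: xs) 1 : Int) + 1 := by
              simp [PySem.List.count_eq, List.count_append]; ring
            omega
          have hn1 : n - 1 ≠ 0 := by
            have : (PySem.List.count ((done ++ [1]) ++ xs) 1 : Int)
                = (PySem.List.count (done ++ (1 : Int) :: xs) 1 : Int) := by
              simp
            omega
          have hrec := ih (done := done ++ [1]) (n := n - 1) hcnt hn1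
          have hlen : done.length + 1 = (done ++ [1]).length := by simp
          rw [show done ++ (1 : Int) :: xs = (done ++ [1]) ++ xs by simp, hlen, hrec]
          simp [flipF, h0]
      · rw [hget, if_neg hx]
        have hstop : ¬ (PySem.List.count (done ++ x :: xs) 1 : Int) = 154 := by omega
        rw [if_neg hstop]
        have hcnt : 154 - (PySem.List.count ((done ++ [x]) ++ xs) 1 : Int) = n := by
          have : (done ++ [x]) ++ xs = done ++ x :: xs := by simp
          rw [this]; exact hn
        have hrec := ih (done := done ++ [x]) (n := n) hcnt h0
        have hlen : done.length + 1 = (done ++ [x]).length := by simp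
        rw [show done ++ x :: xs = (done ++ [x]) ++ xs by simp, hlen, hrec]
        simp [flipF, hx, h0]

theorem fold_zero (l out : List Int) :
    (l.foldl
      (fun (st : List Int × Int) x =>
        if st.2 ≠ 0 ∧ x = 0 then (st.1 ++ [1], st.2 - 1) else (st.1 ++ [x], st.2))
      (out, 0)) = (out ++ l, 0) := by
  induction l generalizing out with
  | nil => simp
  | cons x xs ih => simp [List.foldl_cons, ih]

theorem fold_eq_flipF (l out : List Int) (n : Int) :
    (l.foldl
      (fun (st : List Int × Int) x =>
        if st.2 ≠ 0 ∧ x = 0 then (st.1 ++ [1], st.2 - 1) else (st.1 ++ [x], st.2))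
      (out, n)).1 = out ++ flipF l n := by
  induction l generalizing out n with
  | nil => simp [flipF]
  | cons x xs ih =>
      by_cases h0 : n = 0
      · subst h0
        rw [List.foldl_cons]
        rw [if_neg (by simp)]
        rw [fold_zero]
        simp [flipF]
      · by_cases hx : x = 0
        · subst hx
          rw [List.foldl_cons, if_pos ⟨h0, rfl⟩, ih]
          simp [flipF, h0]
        · rw [List.foldl_cons, if_neg (by simp [hx]), ih]
          simp [flipF, h0, hx]

-- ===== VERDICT (by name: the statement is the Claim_ definition above) =====
theorem checking_1_majority_spec : Claim_equal_checking_1_majority := by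
  intro list _
  unfold Spec_checking_1_majority checking_1_majority checking_1_majority_alt
  simp only []
  by_cases h : (PySem.List.count list 1 : Int) = 154
  · rw [if_neg (by omega), if_neg (by omega)]
  · rw [if_pos h, if_pos (by omega), fold_eq_flipF]
    have := go_eq_flipF list [] (154 - (PySem.List.count list 1 : Int)) (by simp) (by omega)
    simpa using this
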